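-- pv_equiv track=rewrite | github.com/tonghuikang/meta-ai-hackercup-2024 | execution_code/bunny_hopscotch/015.py | compute_total_pairs
-- ===== SOURCE A (Python) =====
-- def compute_total_pairs(R, C, s):
--     total = 0
--     for dx in range(0, s + 1):
--         x_count = R - dx
--         for dy in range(0, s + 1):
--             y_count = C - dy
--             if dx == 0 and dy == 0:
--                 total += x_count * y_count
--             elif dx == 0 or dy == 0:
--                 total += 2 * x_count * y_count
--             else:
--                 total += 4 * x_count * y_count
--     return total
-- ===== SOURCE B (Python) =====
-- def compute_total_pairs(R, C, s):
--     # The weight (1/2/4) factorizes as (1 if dx==0 else 2)*(1 if dy==0 else 2),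
--     # so the double sum is a product of two per-axis arithmetic series in closed form.
--     if s < 0:
--         return 0  # empty offset range
--     t = 2 * s + 1
--     q = s * (s + 1)
--     return (R * t - q) * (C * t - q)
-- ===== Notes on version B (the rewrite author's own statement) =====
-- stated objective: faster
-- what changed: Replaced the nested O(s^2) loop by a closed form: the 1/2/4 weight factorizes per axis, so the total is the product of two arithmetic-series sums (R*(2s+1)-s(s+1))*(C*(2s+1)-s(s+1)).
import Mathlib
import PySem

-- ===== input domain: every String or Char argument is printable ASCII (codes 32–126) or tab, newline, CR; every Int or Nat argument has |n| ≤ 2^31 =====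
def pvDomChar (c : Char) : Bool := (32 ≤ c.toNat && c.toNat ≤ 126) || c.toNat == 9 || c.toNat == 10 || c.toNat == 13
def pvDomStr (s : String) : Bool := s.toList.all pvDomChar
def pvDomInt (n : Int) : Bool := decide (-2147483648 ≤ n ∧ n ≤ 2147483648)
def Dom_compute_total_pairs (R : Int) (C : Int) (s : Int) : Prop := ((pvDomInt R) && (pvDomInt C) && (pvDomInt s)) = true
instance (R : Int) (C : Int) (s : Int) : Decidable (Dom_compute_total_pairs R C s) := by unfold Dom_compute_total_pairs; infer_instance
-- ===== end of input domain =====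

-- B replaces A's nested loop by a closed form: the 1/2/4 weight factorizes per axis,
-- so the total is a product of two arithmetic-series sums; proved equal to A on all inputs.

-- ===== PORT A =====
def compute_total_pairs (R : Int) (C : Int) (s : Int) : Int :=
  (PySem.List.pyRange 0 (s + 1) 1).foldl (fun total dx =>
    let x_count := R - dx
    (PySem.List.pyRange 0 (s + 1) 1).foldl (fun total dy =>
      let y_count := C - dy
      if dx = 0 ∧ dy = 0 then total + x_count * y_count
      else if dx = 0 ∨ dy = 0 then total + 2 * x_count * y_count
      else total + 4 * x_count * y_count) total) 0

-- ===== PORT B =====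
def compute_total_pairs_alt (R : Int) (C : Int) (s : Int) : Int :=
  if s < 0 then 0
  else
    let t := 2 * s + 1
    let q := s * (s + 1)
    (R * t - q) * (C * t - q)

-- ===== PRECONDITION & SPEC =====
def Spec_compute_total_pairs (R : Int) (C : Int) (s : Int) (out : Int) : Prop := out = compute_total_pairs_alt R C s
instance (R : Int) (C : Int) (s : Int) (out : Int) : Decidable (Spec_compute_total_pairs R C s out) := by unfold Spec_compute_total_pairs; infer_instance

-- ===== CLAIM (what is proved, stated in full; the proofs are below) =====
def Claim_equal_compute_total_pairs : Prop := ∀ (R : Int) (C : Int) (s : Int), Dom_compute_total_pairs R C s → Spec_compute_total_pairs R C s (compute_total_pairs R C s)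

-- ===== LEMMAS AND PROOFS =====

-- per-axis weight: 1 for offset 0, 2 otherwise (the 1/2/4 weight is pvAxisTerm·pvAxisTerm)
def pvAxisTerm (T : Int) (d : Int) : Int := (if d = 0 then 1 else 2) * (T - d)

-- A's inner-loop body adds exactly the product of the two per-axis terms
theorem pv_body_eq (R C dx : Int) (total dy : Int) :
    (let y_count := C - dy
     if dx = 0 ∧ dy = 0 then total + (R - dx) * y_count
     else if dx = 0 ∨ dy = 0 then total + 2 * (R - dx) * y_count
     else total + 4 * (R - dx) * y_count)
    = total + pvAxisTerm R dx * pvAxisTerm C dy := by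
  simp only [pvAxisTerm]
  split_ifs <;> simp_all <;> ring

-- the per-axis series over range(0, n+1) in closed form
theorem pv_series (T : Int) (n : Nat) :
    ((List.range (n + 1)).map (fun k : Nat => pvAxisTerm T (0 + (k : Int)))).sum
      = T * (2 * (n : Int) + 1) - (n : Int) * ((n : Int) + 1) := by
  induction n with
  | zero => simp [pvAxisTerm]
  | succ m ih =>
    rw [List.range_succ, List.map_append, List.sum_append, ih]
    simp only [List.map_cons, List.map_nil, List.sum_cons, List.sum_nil]
    simp only [pvAxisTerm]
    rw [if_neg (by push_cast; omega)]
    push_cast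
    ring

theorem compute_total_pairs_eq_alt (R C s : Int) :
    compute_total_pairs R C s = compute_total_pairs_alt R C s := by
  unfold compute_total_pairs compute_total_pairs_alt
  by_cases hs : s < 0
  · have h0 : (s + 1 - 0).toNat = 0 := by omega
    rw [PySem.List.pyRange_one, h0]
    simp [hs]
  · have hn : (s + 1 - 0).toNat = s.toNat + 1 := by omega
    have hsum : ∀ T : Int,
        ((PySem.List.pyRange 0 (s + 1) 1).map (pvAxisTerm T)).sum
          = T * (2 * s + 1) - s * (s + 1) := by
      intro T
      rw [PySem.List.pyRange_one, hn, List.map_map]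
      have := pv_series T s.toNat
      have hc : ((s.toNat : Int)) = s := by omega
      rw [hc] at this
      simpa [Function.comp] using this
    have hinner : ∀ dx total : Int,
        (PySem.List.pyRange 0 (s + 1) 1).foldl (fun total dy =>
          let y_count := C - dy
          if dx = 0 ∧ dy = 0 then total + (R - dx) * y_count
          else if dx = 0 ∨ dy = 0 then total + 2 * (R - dx) * y_count
          else total + 4 * (R - dx) * y_count) total
        = total + pvAxisTerm R dx * (C * (2 * s + 1) - s * (s + 1)) := by
      intro dx total
      have hfun : (fun (total dy : Int) =>
          let y_count := C - dy
          if dx = 0 ∧ dy = 0 then total + (R - dx) * y_count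
          else if dx = 0 ∨ dy = 0 then total + 2 * (R - dx) * y_count
          else total + 4 * (R - dx) * y_count)
          = fun total dy => total + pvAxisTerm R dx * pvAxisTerm C dy := by
        funext t dy; exact pv_body_eq R C dx t dy
      rw [hfun, PySem.List.foldl_add, PySem.List.sum_map_const_mul_int, hsum C]
    have houter : (PySem.List.pyRange 0 (s + 1) 1).foldl (fun total dx =>
        let x_count := R - dx
        (PySem.List.pyRange 0 (s + 1) 1).foldl (fun total dy =>
          let y_count := C - dy
          if dx = 0 ∧ dy = 0 then total + x_count * y_count
          else if dx = 0 ∨ dy = 0 then total + 2 * x_count * y_count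
          else total + 4 * x_count * y_count) total) 0
        = 0 + ((PySem.List.pyRange 0 (s + 1) 1).map
            (fun dx => pvAxisTerm R dx * (C * (2 * s + 1) - s * (s + 1)))).sum := by
      rw [show (fun (total dx : Int) =>
          let x_count := R - dx
          (PySem.List.pyRange 0 (s + 1) 1).foldl (fun total dy =>
            let y_count := C - dy
            if dx = 0 ∧ dy = 0 then total + x_count * y_count
            else if dx = 0 ∨ dy = 0 then total + 2 * x_count * y_count
            else total + 4 * x_count * y_count) total)
          = fun total dx => total + pvAxisTerm R dx * (C * (2 * s + 1) - s * (s + 1))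
        from funext fun t => funext fun dx => hinner dx t]
      exact PySem.List.foldl_add _ _ _
    rw [houter, List.sum_map_mul_right, hsum R]
    simp [hs]

-- ===== VERDICT (by name: the statement is the Claim_ definition above) =====
theorem compute_total_pairs_spec : Claim_equal_compute_total_pairs := by
  intro R C s _
  exact compute_total_pairs_eq_alt R C s
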